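-- pv_equiv track=rewrite | github.com/pritampanda15/MDInsight | mdinsight/engine.py | _group_consecutive_residues
-- ===== SOURCE A (Python) =====
-- def _group_consecutive_residues(residues):
--     """Group consecutive residue IDs into sublists."""
--     if len(residues) == 0:
--         return []
--     groups = [[residues[0]]]
--     for r in residues[1:]:
--         if r - groups[-1][-1] <= 2:
--             groups[-1].append(r)
--         else:
--             groups.append([r])
--     return groups
-- ===== SOURCE B (Python) =====
-- def _group_consecutive_residues(residues):
--     """Group near-consecutive residue IDs by slicing at gap boundaries."""
--     if not residues:
--         return []
--     out = []
--     start = 0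
--     for i in range(1, len(residues)):
--         if residues[i] - residues[i - 1] > 2:
--             out.append(residues[start:i])
--             start = i
--     out.append(residues[start:])
--     return out
-- ===== Notes on version B (the rewrite author's own statement) =====
-- stated objective: alternative
-- what changed: Instead of maintaining an evolving last group and appending each element to it, B scans gap positions residues[i]-residues[i-1] > 2 and emits whole groups as slices between a remembered start index and each cut.
import Mathlib
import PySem

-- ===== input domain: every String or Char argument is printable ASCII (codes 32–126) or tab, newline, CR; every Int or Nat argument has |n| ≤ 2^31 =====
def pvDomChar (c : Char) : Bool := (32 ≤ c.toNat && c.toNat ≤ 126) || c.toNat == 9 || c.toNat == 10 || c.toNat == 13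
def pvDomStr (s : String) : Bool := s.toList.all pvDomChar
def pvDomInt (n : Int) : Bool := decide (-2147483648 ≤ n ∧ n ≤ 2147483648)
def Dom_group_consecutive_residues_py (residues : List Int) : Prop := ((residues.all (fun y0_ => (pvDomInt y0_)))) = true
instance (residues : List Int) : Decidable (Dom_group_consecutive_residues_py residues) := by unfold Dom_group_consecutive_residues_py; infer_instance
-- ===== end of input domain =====

-- B groups by scanning gap positions and emitting slices between a remembered start index and each cut,
-- instead of A's evolving last group; same values on every input (alternative decomposition, no speed claim).

-- ===== PORT A =====
-- loop body: if r - groups[-1][-1] <= 2: groups[-1].append(r) else: groups.append([r])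
def pyAStep (groups : List (List Int)) (r : Int) : List (List Int) :=
  if r - PySem.List.pyGetD (PySem.List.pyGetD groups (-1) []) (-1) 0 ≤ 2 then
    groups.dropLast ++ [PySem.List.pyGetD groups (-1) [] ++ [r]]
  else groups ++ [[r]]

def group_consecutive_residues_py (residues : List Int) : List (List Int) :=
  if residues.length = 0 then []
  else
    (PySem.List.slice residues (some 1) none).foldl pyAStep
      [[PySem.List.pyGetD residues 0 0]]

-- ===== PORT B =====
-- loop body: if residues[i] - residues[i-1] > 2: out.append(residues[start:i]); start = i
def pyBStep (residues : List Int) (st : List (List Int) × Int) (i : Int) : List (List Int) × Int :=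
  if 2 < PySem.List.pyGetD residues i 0 - PySem.List.pyGetD residues (i - 1) 0 then
    (st.1 ++ [PySem.List.slice residues (some st.2) (some i)], i)
  else st

-- out.append(residues[start:]); return out
def pyBFinish (residues : List Int) (st : List (List Int) × Int) : List (List Int) :=
  st.1 ++ [PySem.List.slice residues (some st.2) none]

def group_consecutive_residues_py_alt (residues : List Int) : List (List Int) :=
  if residues = [] then []
  else
    pyBFinish residues
      ((PySem.List.pyRange 1 (residues.length : Int) 1).foldl (pyBStep residues) ([], 0))

-- ===== PRECONDITION & SPEC =====
def Spec_group_consecutive_residues_py (residues : List Int) (out : List (List Int)) : Prop := out = group_consecutive_residues_py_alt residues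
instance (residues : List Int) (out : List (List Int)) : Decidable (Spec_group_consecutive_residues_py residues out) := by unfold Spec_group_consecutive_residues_py; infer_instance

-- ===== CLAIM (what is proved, stated in full; the proofs are below) =====
def Claim_equal_group_consecutive_residues_py : Prop := ∀ (residues : List Int), Dom_group_consecutive_residues_py residues → Spec_group_consecutive_residues_py residues (group_consecutive_residues_py residues)

-- ===== LEMMAS AND PROOFS =====

-- canonical grouping: `chunk p xs` splits xs into the continuation of the group whose last element is p, and the rest
def chunk : Int → List Int → List Int × List Int
  | _, [] => ([], [])
  | p, r :: rs => if r - p ≤ 2 then ((chunk r rs).1.cons r, (chunk r rs).2) else ([], r :: rs)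

theorem chunk_snd_length : ∀ (p : Int) (xs : List Int), (chunk p xs).2.length ≤ xs.length := by
  intro p xs
  induction xs generalizing p with
  | nil => simp [chunk]
  | cons r rs ih =>
    simp only [chunk]
    split
    · exact le_trans (ih r) (Nat.le_succ _)
    · simp

def grp : List Int → List (List Int)
  | [] => []
  | x :: xs => (x :: (chunk x xs).1) :: grp (chunk x xs).2
termination_by xs => xs.length
decreasing_by
  simpa using Nat.lt_succ_of_le (chunk_snd_length x xs)

theorem foldA (xs : List Int) : ∀ (acc : List (List Int)) (g : List Int) (p : Int),
    g.getLast? = some p →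
    xs.foldl pyAStep (acc ++ [g]) = acc ++ ((g ++ (chunk p xs).1) :: grp (chunk p xs).2) := by
  induction xs with
  | nil => intro acc g p _; simp [chunk, grp]
  | cons r rs ih =>
    intro acc g p hp
    have hg : g ≠ [] := by rintro rfl; simp at hp
    have hlast : g.getLast hg = p := by
      have := List.getLast?_eq_some_getLast hg
      rw [hp] at this; exact (Option.some.inj this).symm
    have h1 : PySem.List.pyGetD (acc ++ [g]) (-1) ([] : List Int) = g :=
      PySem.List.pyGetD_neg_one_append_singleton acc g []
    have h2 : PySem.List.pyGetD g (-1) (0 : Int) = p := by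
      rw [PySem.List.pyGetD_neg_one g 0 hg]; exact hlast
    simp only [List.foldl_cons, pyAStep, h1, h2, List.dropLast_concat]
    by_cases hc : r - p ≤ 2
    · rw [if_pos hc]
      rw [ih acc (g ++ [r]) r List.getLast?_concat]
      simp [chunk, hc]
    · rw [if_neg hc]
      rw [show acc ++ [g] ++ [[r]] = (acc ++ [g]) ++ [[r]] from rfl,
        ih (acc ++ [g]) [r] r (by simp)]
      simp [chunk, hc, grp]

theorem A_eq_grp (ys : List Int) : group_consecutive_residues_py ys = grp ys := by
  cases ys with
  | nil => simp [group_consecutive_residues_py, grp]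
  | cons x xs =>
    simp only [group_consecutive_residues_py, List.length_cons, Nat.succ_ne_zero, if_false,
      PySem.List.slice_from_one, List.tail_cons, PySem.List.pyGetD_zero_cons]
    have := foldA xs [] [x] x (by simp)
    simpa [grp] using this

-- B-side: running the index loop from j with current group starting at s
theorem foldB (ys : List Int) : ∀ (k j s : ℕ) (out : List (List Int)),
    ys.length - j = k → 1 ≤ j → j ≤ ys.length → s < j →
    pyBFinish ys ((PySem.List.pyRange (j : Int) (ys.length : Int) 1).foldl (pyBStep ys) (out, (s : Int)))
      = out ++ ((PySem.List.slice ys (some (s : Int)) (some (j : Int)) ++ (chunk (ys.getD (j - 1) 0) (ys.drop j)).1)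
                 :: grp (chunk (ys.getD (j - 1) 0) (ys.drop j)).2) := by
  intro k
  induction k with
  | zero =>
    intro j s out hk h1 h2 h3
    have hj : j = ys.length := by omega
    subst hj
    rw [PySem.List.pyRange_one_eq_nil (le_refl _)]
    simp only [List.foldl_nil, pyBFinish, chunk, List.drop_length, grp]
    rw [PySem.List.slice_from_natCast, PySem.List.slice_natCast]
    simp [List.take_of_length_le]
  | succ k ih =>
    intro j s out hk h1 h2 h3
    have hjlt : j < ys.length := by omega
    rw [PySem.List.pyRange_one_cons (by exact_mod_cast hjlt)]
    simp only [List.foldl_cons]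
    have hgj : PySem.List.pyGetD ys ((j : Int)) 0 = ys[j] := by
      rw [PySem.List.pyGetD_natCast]; exact List.getD_eq_getElem ys 0 hjlt
    have hgj1 : PySem.List.pyGetD ys ((j : Int) - 1) 0 = ys.getD (j - 1) 0 := by
      rw [show (j : Int) - 1 = ((j - 1 : ℕ) : Int) by omega, PySem.List.pyGetD_natCast]
    have hdrop : ys.drop j = ys[j] :: ys.drop (j + 1) := List.drop_eq_getElem_cons hjlt
    by_cases hc : 2 < ys[j] - ys.getD (j - 1) 0
    · -- a cut at j: emit residues[s:j], restart at j
      rw [show pyBStep ys (out, (s : Int)) (j : Int)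
            = (out ++ [PySem.List.slice ys (some (s : Int)) (some (j : Int))], (j : Int)) by
          unfold pyBStep; rw [hgj, hgj1, if_pos hc]]
      rw [show ((j : Int) + 1) = ((j + 1 : ℕ) : Int) by push_cast; ring] at *
      rw [ih (j + 1) j (out ++ [PySem.List.slice ys (some (s : Int)) (some (j : Int))])
            (by omega) (by omega) (by omega) (by omega)]
      have hjj : ys.getD ((j + 1) - 1) 0 = ys[j] := by
        simpa using List.getD_eq_getElem ys 0 hjlt
      rw [hjj]
      have hslice1 : PySem.List.slice ys (some (j : Int)) (some ((j + 1 : ℕ) : Int)) = [ys[j]] := by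
        rw [PySem.List.slice_natCast, show j + 1 - j = 1 by omega, hdrop]
        rfl
      rw [hslice1, hdrop]
      rw [show chunk (ys.getD (j - 1) 0) (ys[j] :: ys.drop (j + 1)) = ([], ys[j] :: ys.drop (j + 1)) by
        simp only [chunk]; rw [if_neg (not_le.mpr hc)]]
      simp only [grp]
      simp
    · -- no cut: the current group extends over j
      rw [show pyBStep ys (out, (s : Int)) (j : Int) = (out, (s : Int)) by
          unfold pyBStep; rw [hgj, hgj1, if_neg hc]]
      rw [show ((j : Int) + 1) = ((j + 1 : ℕ) : Int) by push_cast; ring] at *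
      rw [ih (j + 1) s out (by omega) (by omega) (by omega) (by omega)]
      have hjj : ys.getD ((j + 1) - 1) 0 = ys[j] := by
        simpa using List.getD_eq_getElem ys 0 hjlt
      rw [hjj]
      have hext : PySem.List.slice ys (some (s : Int)) (some ((j + 1 : ℕ) : Int))
          = PySem.List.slice ys (some (s : Int)) (some (j : Int)) ++ [ys[j]] := by
        rw [PySem.List.slice_natCast, PySem.List.slice_natCast]
        rw [show j + 1 - s = (j - s) + 1 by omega, List.take_add_one]
        have : (ys.drop s)[j - s]? = some ys[j] := by
          rw [List.getElem?_drop, show s + (j - s) = j by omega]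
          exact List.getElem?_eq_getElem hjlt
        rw [this]; rfl
      rw [hext, hdrop]
      have hle : ys[j] - ys.getD (j - 1) 0 ≤ 2 := not_lt.mp hc
      rw [show chunk (ys.getD (j - 1) 0) (ys[j] :: ys.drop (j + 1))
            = (ys[j] :: (chunk ys[j] (ys.drop (j + 1))).1, (chunk ys[j] (ys.drop (j + 1))).2) by
        simp only [chunk]; rw [if_pos hle]]
      simp

theorem B_eq_grp (ys : List Int) : group_consecutive_residues_py_alt ys = grp ys := by
  cases ys with
  | nil => simp [group_consecutive_residues_py_alt, grp]
  | cons x xs =>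
    simp only [group_consecutive_residues_py_alt, if_neg (List.cons_ne_nil x xs)]
    have h := foldB (x :: xs) ((x :: xs).length - 1) 1 0 []
      rfl (le_refl _) (by simp) (by omega)
    simp only [Nat.cast_one, Nat.cast_zero] at h
    rw [h]
    have hs : PySem.List.slice (x :: xs) (some (0 : Int)) (some (1 : Int)) = [x] := by
      rw [show (0 : Int) = ((0 : ℕ) : Int) by rfl, show (1 : Int) = ((1 : ℕ) : Int) by rfl,
        PySem.List.slice_natCast]
      simp
    simp [hs, grp]

-- ===== VERDICT (by name: the statement is the Claim_ definition above) =====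
theorem group_consecutive_residues_py_spec : Claim_equal_group_consecutive_residues_py := by
  intro residues _
  unfold Spec_group_consecutive_residues_py
  rw [A_eq_grp, B_eq_grp]
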